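-- pv_equiv track=rewrite | github.com/JayMon0327/matterhub-flask | wifi_config/service.py | _parse_terse_rows
-- ===== SOURCE A (Python) =====
-- def _split_terse_line(line: str) -> list[str]:
--     parts: list[str] = []
--     buffer: list[str] = []
--     escaped = False
--
--     for char in line:
--         if escaped:
--             buffer.append(char)
--             escaped = False
--             continue
--         if char == "\\":
--             escaped = True
--             continue
--         if char == ":":
--             parts.append("".join(buffer))
--             buffer = []
--             continue
--         buffer.append(char)
--
--     if escaped:
--         buffer.append("\\")
--     parts.append("".join(buffer))
--     return parts
--
-- def _parse_terse_rows(output: str, columns: list[str]) -> list[dict[str, str]]: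
--     rows: list[dict[str, str]] = []
--     for raw_line in output.splitlines():
--         line = raw_line.strip()
--         if not line:
--             continue
--         values = _split_terse_line(line)
--         if len(values) < len(columns):
--             values.extend([""] * (len(columns) - len(values)))
--         if len(values) > len(columns):
--             values = values[: len(columns) - 1] + [":".join(values[len(columns) - 1 :])]
--         rows.append({column: values[index] for index, column in enumerate(columns)})
--     return rows
-- ===== SOURCE B (Python) =====
-- def _unescape(chars):
--     out = []
--     i = 0
--     while i < len(chars):
--         if chars[i] == "\\" and i + 1 < len(chars):
--             out.append(chars[i + 1])
--             i += 2
--         else: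
--             out.append(chars[i])
--             i += 1
--     return out
--
--
-- def _fields(line):
--     # Phase 1: split into RAW fields at unescaped colons (a colon is a separator
--     # iff the run of backslashes immediately before it has even length).
--     parts = []
--     cur = []
--     bs = 0
--     for ch in line:
--         if ch == "\\":
--             cur.append(ch)
--             bs += 1
--         elif ch == ":" and bs % 2 == 0:
--             parts.append(cur)
--             cur = []
--             bs = 0
--         else:
--             cur.append(ch)
--             bs = 0
--     parts.append(cur)
--     # Phase 2: unescape each raw field pairwise (a trailing lone backslash stays).
--     return ["".join(_unescape(c)) for c in parts]
--
--
-- def _parse_terse_rows(output, columns):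
--     rows = []
--     ncol = len(columns)
--     for raw in output.splitlines():
--         line = raw.strip()
--         if not line:
--             continue
--         vals = _fields(line)
--         head = vals[:max(ncol - 1, 0)]
--         tail = ":".join(vals[len(head):])
--         vals2 = (head + [tail] + [""] * (ncol - len(head) - 1))[:ncol]
--         rows.append(dict(zip(columns, vals2)))
--     return rows
-- ===== Notes on version B (the rewrite author's own statement) =====
-- stated objective: alternative
-- what changed: Replaces the single stateful escaped-flag character loop (which unescapes while splitting) by a two-phase tokenizer: split the line into RAW fields at colons preceded by an even-length backslash run, then unescape each field in a separate pairwise pass; row assembly uses a uniform head/joined-tail/pad formula plus dict(zip(...)) instead of pad-then-negative-slice-truncate with an enumerate-indexed dict comprehension.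
import Mathlib
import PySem

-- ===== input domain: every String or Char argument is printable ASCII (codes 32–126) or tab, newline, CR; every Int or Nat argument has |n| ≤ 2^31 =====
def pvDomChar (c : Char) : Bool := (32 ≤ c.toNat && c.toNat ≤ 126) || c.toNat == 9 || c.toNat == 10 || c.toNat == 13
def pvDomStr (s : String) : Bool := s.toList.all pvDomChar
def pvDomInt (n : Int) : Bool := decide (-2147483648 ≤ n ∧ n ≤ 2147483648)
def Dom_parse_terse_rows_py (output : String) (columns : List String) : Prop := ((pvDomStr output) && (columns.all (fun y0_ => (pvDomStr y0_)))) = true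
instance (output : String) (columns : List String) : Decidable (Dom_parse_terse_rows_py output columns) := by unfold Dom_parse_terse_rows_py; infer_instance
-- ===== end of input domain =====

-- B replaces A's single stateful escaped-flag split loop by a two-phase tokenizer
-- (raw split at colons after an even backslash run, then a pairwise unescape pass)
-- and a uniform head/joined-tail/pad row formula with dict(zip) — alternative, same cost.


-- ===== PORT A =====
-- _split_terse_line: one pass with an escaped flag, building already-unescaped fields.
def split_terse_line_A (line : List Char) : List String :=
  let st : List String × List Char × Bool :=
    line.foldl
      (fun st char =>
        let parts := st.1
        let buffer := st.2.1
        let escaped := st.2.2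
        if escaped then (parts, buffer ++ [char], false)
        else if char = '\\' then (parts, buffer, true)
        else if char = ':' then (parts ++ [String.ofList buffer], ([] : List Char), false)
        else (parts, buffer ++ [char], false))
      ([], [], false)
  let buffer := if st.2.2 then st.2.1 ++ ['\\'] else st.2.1
  st.1 ++ [String.ofList buffer]

def parse_terse_rows_py (output : String) (columns : List String) : List (List (String × String)) :=
  (PySem.Str.splitlines output).foldl
    (fun rows raw_line =>
      let line := PySem.Str.strip raw_line
      if line = "" then rows
      else
        let values := split_terse_line_A line.toList
        let values :=
          if values.length < columns.length
          then values ++ List.replicate (columns.length - values.length) ""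
          else values
        let values :=
          if values.length > columns.length
          then PySem.List.slice values none (some ((columns.length : Int) - 1)) ++
               [PySem.Str.join ":" (PySem.List.slice values (some ((columns.length : Int) - 1)) none)]
          else values
        rows ++ [((PySem.List.enumerate columns).foldl
                   (fun d ic => d.insert ic.2 (PySem.List.pyGetD values ic.1 ""))
                   (PySem.Dict.empty : PySem.Dict String String)).items])
    []

-- ===== PORT B =====
-- _unescape: pairwise pass; a trailing lone backslash stays.
def unescape_B : List Char → List Char
  | [] => []
  | c :: rest =>
    if c = '\\' then
      match rest with
      | [] => [c]
      | d :: rest' => d :: unescape_B rest'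
    else c :: unescape_B rest

-- _fields: raw split at colons preceded by an even backslash run, then unescape each.
def fields_B (line : List Char) : List String :=
  let st : List (List Char) × List Char × Nat :=
    line.foldl
      (fun st ch =>
        let parts := st.1
        let cur := st.2.1
        let bs := st.2.2
        if ch = '\\' then (parts, cur ++ [ch], bs + 1)
        else if ch = ':' ∧ bs % 2 = 0 then (parts ++ [cur], ([] : List Char), 0)
        else (parts, cur ++ [ch], 0))
      ([], [], 0)
  (st.1 ++ [st.2.1]).map (fun cs => String.ofList (unescape_B cs))

def parse_terse_rows_py_alt (output : String) (columns : List String) : List (List (String × String)) :=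
  (PySem.Str.splitlines output).foldl
    (fun rows raw =>
      let line := PySem.Str.strip raw
      if line = "" then rows
      else
        let vals := fields_B line.toList
        let ncol := columns.length
        let head := vals.take (ncol - 1)      -- vals[:max(ncol-1,0)]; Nat subtraction = the max
        let tail := PySem.Str.join ":" (vals.drop head.length)
        -- [""] * (ncol - len(head) - 1): Nat subtraction matches Python's negative repeat = []
        let vals2 := (head ++ [tail] ++ List.replicate (ncol - head.length - 1) "").take ncol
        rows ++ [((columns.zip vals2).foldl
                   (fun d cv => d.insert cv.1 cv.2)
                   (PySem.Dict.empty : PySem.Dict String String)).items])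
    []

-- ===== PRECONDITION & SPEC =====
def Spec_parse_terse_rows_py (output : String) (columns : List String) (out : List (List (String × String))) : Prop := out = parse_terse_rows_py_alt output columns
instance (output : String) (columns : List String) (out : List (List (String × String))) : Decidable (Spec_parse_terse_rows_py output columns out) := by unfold Spec_parse_terse_rows_py; infer_instance

-- ===== CLAIM (what is proved, stated in full; the proofs are below) =====
def Claim_equal_parse_terse_rows_py : Prop := ∀ (output : String) (columns : List String), Dom_parse_terse_rows_py output columns → Spec_parse_terse_rows_py output columns (parse_terse_rows_py output columns)

-- ===== LEMMAS AND PROOFS =====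

-- Proof-side mirrors of the two per-character step functions of the ports.
def stepA (st : List String × List Char × Bool) (char : Char) : List String × List Char × Bool :=
  let parts := st.1
  let buffer := st.2.1
  let escaped := st.2.2
  if escaped then (parts, buffer ++ [char], false)
  else if char = '\\' then (parts, buffer, true)
  else if char = ':' then (parts ++ [String.ofList buffer], ([] : List Char), false)
  else (parts, buffer ++ [char], false)

def stepB (st : List (List Char) × List Char × Nat) (ch : Char) : List (List Char) × List Char × Nat :=
  let parts := st.1
  let cur := st.2.1
  let bs := st.2.2
  if ch = '\\' then (parts, cur ++ [ch], bs + 1)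
  else if ch = ':' ∧ bs % 2 = 0 then (parts ++ [cur], ([] : List Char), 0)
  else (parts, cur ++ [ch], 0)

-- A's stateful unescaping step (buffer, escaped-flag) and its fold.
def ustStep (st : List Char × Bool) (c : Char) : List Char × Bool :=
  if st.2 then (st.1 ++ [c], false)
  else if c = '\\' then (st.1, true)
  else (st.1 ++ [c], false)

def ust (cs : List Char) : List Char × Bool := cs.foldl ustStep ([], false)

theorem ustStep_shift (buf : List Char) (esc : Bool) (c : Char) :
    ustStep (buf, esc) c = (buf ++ (ustStep ([], esc) c).1, (ustStep ([], esc) c).2) := by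
  rcases esc <;> by_cases hc : c = '\\' <;> simp [ustStep, hc]

theorem ust_shift (cs : List Char) (buf : List Char) (esc : Bool) :
    cs.foldl ustStep (buf, esc) =
      (buf ++ (cs.foldl ustStep ([], esc)).1, (cs.foldl ustStep ([], esc)).2) := by
  induction cs generalizing buf esc with
  | nil => simp
  | cons c cs ih =>
    simp only [List.foldl_cons]
    rw [ustStep_shift buf esc c]
    generalize ustStep ([], esc) c = p
    obtain ⟨δ, esc'⟩ := p
    rw [ih (buf ++ δ) esc', ih δ esc', List.append_assoc]

theorem ust_concat (cs : List Char) (c : Char) :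
    ust (cs ++ [c]) = ustStep (ust cs) c := by
  simp [ust, List.foldl_append]

theorem ust_cons (c : Char) (rest : List Char) :
    ust (c :: rest) = (if c = '\\' then rest.foldl ustStep ([], true)
                       else (c :: (ust rest).1, (ust rest).2)) := by
  by_cases hc : c = '\\'
  · simp [ust, List.foldl_cons, ustStep, hc]
  · simp only [ust, List.foldl_cons, ustStep, hc]
    simp only [Bool.false_eq_true, if_false, List.nil_append]
    rw [ust_shift rest [c] false]
    rfl

-- B's pairwise unescape recovers A's stateful unescape plus the pending backslash.
theorem unescape_B_eq (cs : List Char) :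
    unescape_B cs = (ust cs).1 ++ (if (ust cs).2 then ['\\'] else []) := by
  induction cs using unescape_B.induct with
  | case1 => simp [unescape_B, ust]
  | case2 => simp [unescape_B, ust, ustStep]
  | case3 d rest ih =>
    have h1 : ust ('\\' :: d :: rest) = (d :: (ust rest).1, (ust rest).2) := by
      rw [ust_cons]
      simp only [List.foldl_cons]
      have h2 : ustStep ([], true) d = ([d], false) := by simp [ustStep]
      rw [h2, ust_shift rest [d] false]
      rfl
    simp only [unescape_B, h1, ih]
    rfl
  | case4 c rest hc ih =>
    have h1 : ust (c :: rest) = (c :: (ust rest).1, (ust rest).2) := by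
      rw [ust_cons, if_neg hc]
    rw [unescape_B.eq_def]
    simp [hc, h1, ih]

-- Main split invariant: A's fold state is B's fold state viewed through ust.
theorem split_invariant (line : List Char) (parts : List (List Char)) (cur : List Char) (bs : Nat)
    (h : (ust cur).2 = (bs % 2 == 1)) :
    line.foldl stepA (parts.map (fun cs => String.ofList (unescape_B cs)), (ust cur).1, (ust cur).2)
      = ((line.foldl stepB (parts, cur, bs)).1.map (fun cs => String.ofList (unescape_B cs)),
         (ust (line.foldl stepB (parts, cur, bs)).2.1).1,
         (ust (line.foldl stepB (parts, cur, bs)).2.1).2)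
    ∧ (ust (line.foldl stepB (parts, cur, bs)).2.1).2
        = ((line.foldl stepB (parts, cur, bs)).2.2 % 2 == 1) := by
  induction line generalizing parts cur bs with
  | nil => exact ⟨rfl, h⟩
  | cons ch line ih =>
    simp only [List.foldl_cons]
    by_cases hch : ch = '\\'
    · subst hch
      rcases hesc : (ust cur).2 with _ | _
      · -- escaped = false, bs even
        have hbs : ¬ bs % 2 = 1 := by
          rw [hesc] at h; simpa using h.symm
        have hA : stepA (parts.map (fun cs => String.ofList (unescape_B cs)), (ust cur).1, false)
            '\\' = (parts.map (fun cs => String.ofList (unescape_B cs)), (ust cur).1, true) := by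
          simp [stepA]
        have hB : stepB (parts, cur, bs) '\\' = (parts, cur ++ ['\\'], bs + 1) := by
          simp [stepB]
        have hu : ust (cur ++ ['\\']) = ((ust cur).1, true) := by
          rw [ust_concat]; simp [ustStep, hesc]
        rw [hA, hB]
        have := ih parts (cur ++ ['\\']) (bs + 1) (by rw [hu]; simp; omega)
        rw [hu] at this
        exact this
      · -- escaped = true, bs odd
        have hA : stepA (parts.map (fun cs => String.ofList (unescape_B cs)), (ust cur).1, true)
            '\\' = (parts.map (fun cs => String.ofList (unescape_B cs)), (ust cur).1 ++ ['\\'], false) := by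
          simp [stepA]
        have hB : stepB (parts, cur, bs) '\\' = (parts, cur ++ ['\\'], bs + 1) := by
          simp [stepB]
        have hbs : bs % 2 = 1 := by
          rw [hesc] at h; simpa using h.symm
        have hu : ust (cur ++ ['\\']) = ((ust cur).1 ++ ['\\'], false) := by
          rw [ust_concat]; simp [ustStep, hesc]
        rw [hA, hB]
        have := ih parts (cur ++ ['\\']) (bs + 1) (by rw [hu]; simp; omega)
        rw [hu] at this
        exact this
    · by_cases hcol : ch = ':'
      · subst hcol
        rcases hesc : (ust cur).2 with _ | _
        · -- escaped = false, bs even: separator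
          have hbs : bs % 2 = 0 := by
            rw [hesc] at h
            have := h.symm; simp at this; omega
          have hA : stepA (parts.map (fun cs => String.ofList (unescape_B cs)), (ust cur).1, false)
              ':' = ((parts.map (fun cs => String.ofList (unescape_B cs))) ++ [String.ofList (ust cur).1],
                     ([] : List Char), false) := by
            simp [stepA, hch]
          have hB : stepB (parts, cur, bs) ':' = (parts ++ [cur], ([] : List Char), 0) := by
            simp [stepB, hch, hbs]
          rw [hA, hB]
          have hg : String.ofList (unescape_B cur) = String.ofList (ust cur).1 := by
            rw [unescape_B_eq, hesc]; simp
          have := ih (parts ++ [cur]) [] 0 (by simp [ust])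
          have hmap : (parts ++ [cur]).map (fun cs => String.ofList (unescape_B cs))
              = parts.map (fun cs => String.ofList (unescape_B cs)) ++ [String.ofList (ust cur).1] := by
            simp [hg]
          rw [hmap] at this
          have hu0 : ust ([] : List Char) = (([] : List Char), false) := rfl
          rw [hu0] at this
          exact this
        · -- escaped = true, bs odd: the colon is data
          have hbs : ¬ bs % 2 = 0 := by
            rw [hesc] at h
            have := h.symm; simp at this; omega
          have hA : stepA (parts.map (fun cs => String.ofList (unescape_B cs)), (ust cur).1, true)
              ':' = (parts.map (fun cs => String.ofList (unescape_B cs)), (ust cur).1 ++ [':'], false) := by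
            simp [stepA]
          have hB : stepB (parts, cur, bs) ':' = (parts, cur ++ [':'], 0) := by
            simp [stepB, hch, hbs]
          have hu : ust (cur ++ [':']) = ((ust cur).1 ++ [':'], false) := by
            rw [ust_concat]; simp [ustStep, hesc]
          rw [hA, hB]
          have := ih parts (cur ++ [':']) 0 (by rw [hu]; simp)
          rw [hu] at this
          exact this
      · -- ordinary character
        rcases hesc : (ust cur).2 with _ | _
        · have hA : stepA (parts.map (fun cs => String.ofList (unescape_B cs)), (ust cur).1, false)
              ch = (parts.map (fun cs => String.ofList (unescape_B cs)), (ust cur).1 ++ [ch], false) := by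
            simp [stepA, hch, hcol]
          have hB : stepB (parts, cur, bs) ch = (parts, cur ++ [ch], 0) := by
            simp [stepB, hch, hcol]
          have hu : ust (cur ++ [ch]) = ((ust cur).1 ++ [ch], false) := by
            rw [ust_concat]; simp [ustStep, hesc, hch]
          rw [hA, hB]
          have := ih parts (cur ++ [ch]) 0 (by rw [hu]; simp)
          rw [hu] at this
          exact this
        · have hA : stepA (parts.map (fun cs => String.ofList (unescape_B cs)), (ust cur).1, true)
              ch = (parts.map (fun cs => String.ofList (unescape_B cs)), (ust cur).1 ++ [ch], false) := by
            simp [stepA]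
          have hB : stepB (parts, cur, bs) ch = (parts, cur ++ [ch], 0) := by
            simp [stepB, hch, hcol]
          have hu : ust (cur ++ [ch]) = ((ust cur).1 ++ [ch], false) := by
            rw [ust_concat]; simp [ustStep, hesc]
          rw [hA, hB]
          have := ih parts (cur ++ [ch]) 0 (by rw [hu]; simp)
          rw [hu] at this
          exact this

theorem split_eq (line : List Char) : split_terse_line_A line = fields_B line := by
  have H := split_invariant line [] [] 0 (by simp [ust])
  have e1 : line.foldl stepA (([] : List String), ([] : List Char), false)
      = (((line.foldl stepB ([], [], 0)).1).map (fun cs => String.ofList (unescape_B cs)),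
         (ust (line.foldl stepB ([], [], 0)).2.1).1,
         (ust (line.foldl stepB ([], [], 0)).2.1).2) := H.1
  show (let st := line.foldl stepA ([], [], false)
        let buffer := if st.2.2 then st.2.1 ++ ['\\'] else st.2.1
        st.1 ++ [String.ofList buffer])
      = ((line.foldl stepB ([], [], 0)).1 ++ [(line.foldl stepB ([], [], 0)).2.1]).map
          (fun cs => String.ofList (unescape_B cs))
  simp only [e1]
  rw [List.map_append]
  simp only [List.map_cons, List.map_nil]
  congr 1
  rw [unescape_B_eq]
  rcases h2 : (ust (line.foldl stepB ([], [], 0)).2.1).2 <;> simp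

theorem str_join_nil : PySem.Str.join ":" ([] : List String) = "" := by
  have h := PySem.Str.toList_join ":" ([] : List String)
  rw [List.map_nil, PySem.Chars.join_nil] at h
  exact String.toList_injective h

theorem str_join_singleton (x : String) : PySem.Str.join ":" [x] = x := by
  have h := PySem.Str.toList_join ":" [x]
  rw [List.map_singleton, PySem.Chars.join_singleton] at h
  exact String.toList_injective h

-- Proof-side names for the two row-adjustment computations (definitionally the port bodies).
def adjustA (vals : List String) (columns : List String) : List String :=
  let values := if vals.length < columns.length
      then vals ++ List.replicate (columns.length - vals.length) "" else vals
  if values.length > columns.length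
    then PySem.List.slice values none (some ((columns.length : Int) - 1)) ++
         [PySem.Str.join ":" (PySem.List.slice values (some ((columns.length : Int) - 1)) none)]
    else values

def adjustB (vals : List String) (columns : List String) : List String :=
  let head := vals.take (columns.length - 1)
  (head ++ [PySem.Str.join ":" (vals.drop head.length)] ++
    List.replicate (columns.length - head.length - 1) "").take columns.length

theorem adjust_eq (vals : List String) (columns : List String) (h1 : 1 ≤ columns.length) :
    adjustA vals columns = adjustB vals columns := by
  unfold adjustA adjustB
  simp only []
  by_cases hlt : vals.length < columns.length
  · rw [if_pos hlt]
    have hlen : (vals ++ List.replicate (columns.length - vals.length) "").length = columns.length := by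
      simp; omega
    rw [if_neg (by omega)]
    have hhead : vals.take (columns.length - 1) = vals := List.take_of_length_le (by omega)
    rw [hhead, List.drop_length, str_join_nil]
    rw [List.take_of_length_le (i := columns.length) (by simp; omega)]
    rw [List.append_assoc]
    congr 1
    have : columns.length - vals.length = (columns.length - vals.length - 1) + 1 := by omega
    rw [this, List.replicate_succ]
    rfl
  · rw [if_neg hlt]
    have hc : ((columns.length : Int) - 1) = (((columns.length - 1 : Nat)) : Int) := by
      push_cast [h1]; ring
    have hhl : (vals.take (columns.length - 1)).length = columns.length - 1 := by
      simp; omega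
    have hrep : columns.length - (vals.take (columns.length - 1)).length - 1 = 0 := by
      rw [hhl]; omega
    rw [hrep, List.replicate_zero, List.append_nil]
    by_cases hgt : vals.length > columns.length
    · rw [if_pos hgt, hc, PySem.List.slice_to_natCast, PySem.List.slice_from_natCast, hhl]
      rw [List.take_of_length_le (i := columns.length) (by simp; omega)]
    · rw [if_neg hgt]
      have hL : vals.length = columns.length := by omega
      have hdrop : vals.drop (columns.length - 1) = [vals[columns.length - 1]'(by omega)] := by
        rw [List.drop_eq_getElem_cons (by omega)]
        congr 1
        rw [show columns.length - 1 + 1 = vals.length by omega, List.drop_length]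
      rw [hhl, hdrop, str_join_singleton]
      rw [List.take_of_length_le (i := columns.length) (by simp; omega)]
      rw [List.take_append_getElem, show columns.length - 1 + 1 = vals.length by omega,
        List.take_length]

theorem adjustA_len (vals : List String) (columns : List String) (h1 : 1 ≤ columns.length) :
    (adjustA vals columns).length = columns.length := by
  rw [adjust_eq vals columns h1]
  unfold adjustB
  simp only [List.length_take, List.length_append, List.length_replicate,
    List.length_cons, List.length_nil]
  omega

theorem dict_eq (cols : List String) (v2 : List String) (s : Nat) (d : PySem.Dict String String)
    (h : cols.length + s ≤ v2.length) :
    (PySem.List.enumerate cols (s : Int)).foldl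
        (fun d ic => d.insert ic.2 (PySem.List.pyGetD v2 ic.1 "")) d
      = (cols.zip (v2.drop s)).foldl (fun d cv => d.insert cv.1 cv.2) d := by
  induction cols generalizing s d with
  | nil => simp [PySem.List.enumerate]
  | cons c cols ih =>
    have hs : s < v2.length := by simp at h; omega
    rw [PySem.List.enumerate_cons]
    have hdrop : v2.drop s = v2[s] :: v2.drop (s + 1) := List.drop_eq_getElem_cons hs
    rw [hdrop]
    simp only [List.zip_cons_cons, List.foldl_cons]
    have hget : PySem.List.pyGetD v2 ((s : Int)) "" = v2[s] := by
      rw [PySem.List.pyGetD_natCast]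
      exact List.getD_eq_getElem v2 "" hs
    rw [hget]
    have hcast : ((s : Int) + 1) = ((s + 1 : Nat) : Int) := by push_cast; ring
    rw [hcast]
    exact ih (s + 1) _ (by simp at h ⊢; omega)

theorem assembly_eq (vals : List String) (columns : List String) :
    ((PySem.List.enumerate columns).foldl
      (fun d ic => d.insert ic.2 (PySem.List.pyGetD (adjustA vals columns) ic.1 ""))
      (PySem.Dict.empty : PySem.Dict String String)).items
    = ((columns.zip (adjustB vals columns)).foldl
        (fun d cv => d.insert cv.1 cv.2)
        (PySem.Dict.empty : PySem.Dict String String)).items := by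
  by_cases h0 : columns = []
  · subst h0
    simp [PySem.List.enumerate_nil]
  · have h1 : 1 ≤ columns.length := List.length_pos_of_ne_nil h0
    have hd := dict_eq columns (adjustA vals columns) 0
      (PySem.Dict.empty : PySem.Dict String String)
      (by rw [adjustA_len vals columns h1]; omega)
    rw [List.drop_zero] at hd
    rw [show ((0 : Nat) : Int) = (0 : Int) by simp] at hd
    rw [hd, adjust_eq vals columns h1]

-- ===== VERDICT (by name: the statement is the Claim_ definition above) =====
theorem parse_terse_rows_py_spec : Claim_equal_parse_terse_rows_py := by
  intro output columns _
  unfold Spec_parse_terse_rows_py parse_terse_rows_py parse_terse_rows_py_alt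
  apply List.foldl_ext
  intro rows raw _
  by_cases hline : PySem.Str.strip raw = ""
  · simp [hline]
  · simp only [if_neg hline]
    congr 1
    rw [split_eq]
    exact congrArg (fun l => [l]) (assembly_eq (fields_B (PySem.Str.strip raw).toList) columns)
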